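-- pv_equiv track=rewrite | github.com/tgyuuAn/Algorithm | Programmers/Ball_Moving_Simulation_python.py | solution
-- ===== SOURCE A (Python) =====
-- LEFT = 0
--
-- RIGHT = 1
--
-- UP = 2
--
-- DOWN = 3
--
-- def solution(n, m, y, x, queries):
--
--     left = x
--     right = x
--     top = y
--     bottom = y
--
--     for command, distance in queries[::-1]:
--         if command == LEFT:
--             if left == 0:
--                 right = min(right+distance,m-1)
--
--             else:
--                 if left+distance < m:
--                     right = min(right+distance,m-1)
--                     left = min(left+distance,m-1)
--
--                 else: return 0
--
--         elif command == RIGHT: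
--             if right == m-1:
--                 left = max(left-distance,0)
--
--             else:
--                 if right-distance >= 0:
--                     left = max(left-distance,0)
--                     right = max(right-distance,0)
--
--                 else: return 0
--
--         elif command == UP:
--             if top == 0:
--                 bottom = min(bottom+distance,n-1)
--
--             else:
--                 if top+distance < n:
--                     top = min(top+distance, n-1)
--                     bottom = min(bottom+distance, n-1)
--
--                 else: return 0
--
--         elif command == DOWN:
--             if bottom == n-1:
--                 top = max(top-distance,0)
--
--             else:
--                 if bottom-distance >= 0:
--                     top = max(top-distance,0)
--                     bottom = max(bottom-distance,0)
--
--                 else: return 0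
--
--     return ((right-left)+1) * ((bottom-top)+1)
-- ===== SOURCE B (Python) =====
-- LEFT = 0
-- RIGHT = 1
-- UP = 2
-- DOWN = 3
--
-- def _low(v, size, grow, shrink, moves):
--     # evolution of a lower bound (left/top) alone: `grow` pushes it toward size-1
--     # (overflow = no possible start, None), `shrink` pulls it down clamped at 0
--     for c, d in moves:
--         if c == grow:
--             if v != 0:
--                 if v + d >= size:
--                     return None
--                 v = min(v + d, size - 1)
--         elif c == shrink:
--             v = max(v - d, 0)
--     return v
--
-- def _high(v, size, grow, shrink, moves):
--     # evolution of an upper bound (right/bottom) alone: `grow` pushes it up clamped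
--     # at size-1, `shrink` pulls it toward 0 (underflow = no possible start, None)
--     for c, d in moves:
--         if c == grow:
--             v = min(v + d, size - 1)
--         elif c == shrink:
--             if v != size - 1:
--                 if v - d < 0:
--                     return None
--                 v = max(v - d, 0)
--     return v
--
-- def solution(n, m, y, x, queries):
--     rev = list(reversed(queries))
--     l = _low(x, m, LEFT, RIGHT, rev)
--     r = _high(x, m, LEFT, RIGHT, rev)
--     t = _low(y, n, UP, DOWN, rev)
--     b = _high(y, n, UP, DOWN, rev)
--     if l is None or r is None or t is None or b is None:
--         return 0
--     return (r - l + 1) * (b - t + 1)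
-- ===== Notes on version B (the rewrite author's own statement) =====
-- stated objective: alternative
-- what changed: A runs one backward pass over the reversed queries maintaining the coupled 4-variable rectangle (left,right,top,bottom) with an early return 0; B exploits that each bound evolves independently of the other three and instead runs four independent single-coordinate backward scans (a lower-bound automaton and an upper-bound automaton, each over its own axis), each signalling impossibility with None, and combines the four results only at the end.
import Mathlib
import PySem

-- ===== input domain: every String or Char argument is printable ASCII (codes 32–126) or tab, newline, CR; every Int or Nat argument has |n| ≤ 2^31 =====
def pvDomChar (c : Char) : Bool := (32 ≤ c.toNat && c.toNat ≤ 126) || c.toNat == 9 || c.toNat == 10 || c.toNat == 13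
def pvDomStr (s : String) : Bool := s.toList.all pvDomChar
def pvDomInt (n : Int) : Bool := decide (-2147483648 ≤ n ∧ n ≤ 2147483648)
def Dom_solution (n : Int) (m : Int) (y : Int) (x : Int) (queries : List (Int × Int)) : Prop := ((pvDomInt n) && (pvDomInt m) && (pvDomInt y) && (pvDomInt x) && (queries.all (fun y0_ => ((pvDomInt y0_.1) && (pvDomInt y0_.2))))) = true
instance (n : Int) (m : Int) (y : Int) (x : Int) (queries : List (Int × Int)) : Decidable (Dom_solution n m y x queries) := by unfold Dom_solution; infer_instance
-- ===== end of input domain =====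

-- B replaces A's single pass over the coupled 4-variable rectangle by four independent
-- single-coordinate backward scans, one per bound; objective: alternative decomposition, same cost.

-- ===== PORT A =====
def solLoop (n : Int) (m : Int) : List (Int × Int) → Int → Int → Int → Int → Int
  | [], l, r, t, b => ((r - l) + 1) * ((b - t) + 1)
  | (c, d) :: qs, l, r, t, b =>
    if c == 0 then
      if l == 0 then solLoop n m qs l (min (r + d) (m - 1)) t b
      else if l + d < m then solLoop n m qs (min (l + d) (m - 1)) (min (r + d) (m - 1)) t b
      else 0
    else if c == 1 then
      if r == m - 1 then solLoop n m qs (max (l - d) 0) r t b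
      else if r - d >= 0 then solLoop n m qs (max (l - d) 0) (max (r - d) 0) t b
      else 0
    else if c == 2 then
      if t == 0 then solLoop n m qs l r t (min (b + d) (n - 1))
      else if t + d < n then solLoop n m qs l r (min (t + d) (n - 1)) (min (b + d) (n - 1))
      else 0
    else if c == 3 then
      if b == n - 1 then solLoop n m qs l r (max (t - d) 0) b
      else if b - d >= 0 then solLoop n m qs l r (max (t - d) 0) (max (b - d) 0)
      else 0
    else solLoop n m qs l r t b

def solution (n : Int) (m : Int) (y : Int) (x : Int) (queries : List (Int × Int)) : Int :=
  solLoop n m queries.reverse x x y y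

-- ===== PORT B =====
-- lower-bound automaton: `grow` pushes the bound toward size-1 (overflow = none), `shrink` clamps at 0
def lowScan (size grow shrink : Int) : List (Int × Int) → Int → Option Int
  | [], v => some v
  | (c, d) :: ms, v =>
    if c == grow then
      if v != 0 then
        if v + d ≥ size then none
        else lowScan size grow shrink ms (min (v + d) (size - 1))
      else lowScan size grow shrink ms v
    else if c == shrink then lowScan size grow shrink ms (max (v - d) 0)
    else lowScan size grow shrink ms v

-- upper-bound automaton: `grow` clamps at size-1, `shrink` pulls the bound toward 0 (underflow = none)
def highScan (size grow shrink : Int) : List (Int × Int) → Int → Option Int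
  | [], v => some v
  | (c, d) :: ms, v =>
    if c == grow then highScan size grow shrink ms (min (v + d) (size - 1))
    else if c == shrink then
      if v != size - 1 then
        if v - d < 0 then none
        else highScan size grow shrink ms (max (v - d) 0)
      else highScan size grow shrink ms v
    else highScan size grow shrink ms v

def solution_alt (n : Int) (m : Int) (y : Int) (x : Int) (queries : List (Int × Int)) : Int :=
  let rev := queries.reverse
  match lowScan m 0 1 rev x, highScan m 0 1 rev x, lowScan n 2 3 rev y, highScan n 2 3 rev y with
  | some l, some r, some t, some b => (r - l + 1) * (b - t + 1)
  | _, _, _, _ => 0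

-- ===== PRECONDITION & SPEC =====
def Spec_solution (n : Int) (m : Int) (y : Int) (x : Int) (queries : List (Int × Int)) (out : Int) : Prop := out = solution_alt n m y x queries
instance (n : Int) (m : Int) (y : Int) (x : Int) (queries : List (Int × Int)) (out : Int) : Decidable (Spec_solution n m y x queries out) := by unfold Spec_solution; infer_instance

-- ===== CLAIM (what is proved, stated in full; the proofs are below) =====
def Claim_equal_solution : Prop := ∀ (n : Int) (m : Int) (y : Int) (x : Int) (queries : List (Int × Int)), Dom_solution n m y x queries → Spec_solution n m y x queries (solution n m y x queries)

-- ===== LEMMAS AND PROOFS =====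

-- A's coupled 4-variable loop and B's four independent scans agree step by step:
-- each bound's update in A reads only that bound, and any scan failure is A's early 0
theorem solLoop_eq (n m : Int) (qs : List (Int × Int)) :
    ∀ l r t b : Int, solLoop n m qs l r t b =
      (match lowScan m 0 1 qs l, highScan m 0 1 qs r, lowScan n 2 3 qs t, highScan n 2 3 qs b with
       | some l', some r', some t', some b' => (r' - l' + 1) * (b' - t' + 1)
       | _, _, _, _ => 0) := by
  induction qs with
  | nil => intro l r t b; simp [solLoop, lowScan, highScan]
  | cons q qs ih =>
    intro l r t b
    obtain ⟨c, d⟩ := q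
    by_cases h0 : c = 0
    · subst h0
      by_cases hl : l = 0
      · simp [solLoop, lowScan, highScan, hl, ih]
      · by_cases hd : l + d < m
        · have hd' : ¬ m ≤ l + d := by omega
          simp [solLoop, lowScan, highScan, hl, hd, hd', ih]
        · have hd' : m ≤ l + d := by omega
          simp [solLoop, lowScan, highScan, hl, hd, hd']
    · by_cases h1 : c = 1
      · subst h1
        by_cases hr : r = m - 1
        · simp [solLoop, lowScan, highScan, hr, ih]
        · by_cases hd : 0 ≤ r - d
          · have hd' : ¬ r - d < 0 := by omega
            have hd2 : ¬ r < d := by omega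
            simp [solLoop, lowScan, highScan, hr, hd, hd', hd2, ih]
          · have hd' : r - d < 0 := by omega
            have hd2 : r < d := by omega
            cases hL : lowScan m 0 1 qs (max (l - d) 0) <;>
              simp [solLoop, lowScan, highScan, hr, hd, hd', hd2, hL]
      · by_cases h2 : c = 2
        · subst h2
          by_cases ht : t = 0
          · simp [solLoop, lowScan, highScan, ht, ih]
          · by_cases hd : t + d < n
            · have hd' : ¬ n ≤ t + d := by omega
              simp [solLoop, lowScan, highScan, ht, hd, hd', ih]
            · have hd' : n ≤ t + d := by omega
              cases hL : lowScan m 0 1 qs l <;>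
                cases hH : highScan m 0 1 qs r <;>
                  simp [solLoop, lowScan, highScan, ht, hd, hd', hL, hH]
        · by_cases h3 : c = 3
          · subst h3
            by_cases hb : b = n - 1
            · simp [solLoop, lowScan, highScan, hb, ih]
            · by_cases hd : 0 ≤ b - d
              · have hd' : ¬ b - d < 0 := by omega
                have hd2 : ¬ b < d := by omega
                simp [solLoop, lowScan, highScan, hb, hd, hd', hd2, ih]
              · have hd' : b - d < 0 := by omega
                have hd2 : b < d := by omega
                cases hL : lowScan m 0 1 qs l <;>
                  cases hH : highScan m 0 1 qs r <;>
                    cases hT : lowScan n 2 3 qs (max (t - d) 0) <;>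
                      simp [solLoop, lowScan, highScan, hb, hd, hd', hd2, hL, hH, hT]
          · simp [solLoop, lowScan, highScan, h0, h1, h2, h3, ih]

-- ===== VERDICT (by name: the statement is the Claim_ definition above) =====
theorem solution_spec : Claim_equal_solution := by
  intro n m y x qs _
  unfold Spec_solution solution solution_alt
  rw [solLoop_eq]
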